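-- pv_equiv track=rewrite | github.com/shonihei/road-to-mastery | leetcode/teemo-attacking.py | findPoisonDuration
-- ===== SOURCE A (Python) =====
-- def findPoisonDuration(timeSeries, duration):
--     total = 0
--     end = 0
--
--     for time in timeSeries:
--         if time >= end:
--             total += duration
--             end = time + duration
--         else:
--             overlap = end - time
--             total += (duration - overlap)
--             end += (duration - overlap)
--     return total
-- ===== SOURCE B (Python) =====
-- def findPoisonDuration(timeSeries, duration):
--     return sum(min(duration, t - p)
--                for p, t in zip([-duration] + timeSeries, timeSeries))
-- ===== Notes on version B (the rewrite author's own statement) =====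
-- stated objective: simpler
-- what changed: B drops A's stateful (total, end) accumulator entirely: since A's end always equals previous time + duration, B computes a stateless pairwise sum min(duration, t[i]-t[i-1]) over adjacent elements (virtual predecessor -duration) via zip.
import Mathlib
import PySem

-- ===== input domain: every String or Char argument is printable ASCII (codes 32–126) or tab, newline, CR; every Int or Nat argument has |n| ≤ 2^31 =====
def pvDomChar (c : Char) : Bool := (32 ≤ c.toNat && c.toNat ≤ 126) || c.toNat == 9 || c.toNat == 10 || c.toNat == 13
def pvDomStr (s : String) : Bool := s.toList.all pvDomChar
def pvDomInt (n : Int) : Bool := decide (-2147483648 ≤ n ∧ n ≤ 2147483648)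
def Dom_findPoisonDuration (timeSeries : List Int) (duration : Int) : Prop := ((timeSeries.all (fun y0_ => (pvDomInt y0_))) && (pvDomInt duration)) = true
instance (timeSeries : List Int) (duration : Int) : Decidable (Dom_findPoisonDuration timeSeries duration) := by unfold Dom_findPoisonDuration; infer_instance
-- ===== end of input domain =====

-- B replaces A's stateful (total, end) scan by a stateless pairwise sum over adjacent elements; objective: simpler.

-- ===== PORT A =====
def findPoisonDuration (timeSeries : List Int) (duration : Int) : Int :=
  (timeSeries.foldl (fun (st : Int × Int) time =>
      if time ≥ st.2 then (st.1 + duration, time + duration)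
      else (st.1 + (duration - (st.2 - time)), st.2 + (duration - (st.2 - time))))
    (0, 0)).1

-- ===== PORT B =====
def findPoisonDuration_alt (timeSeries : List Int) (duration : Int) : Int :=
  (((-duration) :: timeSeries).zip timeSeries).foldl
    (fun acc pt => acc + min duration (pt.2 - pt.1)) 0

-- ===== PRECONDITION & SPEC =====
def Spec_findPoisonDuration (timeSeries : List Int) (duration : Int) (out : Int) : Prop := out = findPoisonDuration_alt timeSeries duration
instance (timeSeries : List Int) (duration : Int) (out : Int) : Decidable (Spec_findPoisonDuration timeSeries duration out) := by unfold Spec_findPoisonDuration; infer_instance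

-- ===== CLAIM (what is proved, stated in full; the proofs are below) =====
def Claim_equal_findPoisonDuration : Prop := ∀ (timeSeries : List Int) (duration : Int), Dom_findPoisonDuration timeSeries duration → Spec_findPoisonDuration timeSeries duration (findPoisonDuration timeSeries duration)

-- ===== LEMMAS AND PROOFS =====

-- Common characterisation: the sum of min-duration gaps with running previous end e.
def gapSum (d e : Int) : List Int → Int
  | [] => 0
  | x :: xs => min d (x + d - e) + gapSum d (x + d) xs

theorem a_fold_eq_gapSum (d : Int) (ts : List Int) : ∀ (t e : Int),
    (ts.foldl (fun (st : Int × Int) time =>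
        if time ≥ st.2 then (st.1 + d, time + d)
        else (st.1 + (d - (st.2 - time)), st.2 + (d - (st.2 - time))))
      (t, e)).1 = t + gapSum d e ts := by
  induction ts with
  | nil => simp [gapSum]
  | cons x xs ih =>
    intro t e
    simp only [List.foldl_cons, gapSum]
    by_cases h : x ≥ e
    · rw [if_pos h, ih]
      have : min d (x + d - e) = d := by omega
      rw [this]; ring
    · rw [if_neg h]
      have h3 : e + (d - (e - x)) = x + d := by ring
      rw [h3, ih]
      have : min d (x + d - e) = d - (e - x) := by omega
      rw [this]; ring

theorem b_fold_eq_gapSum (d : Int) (ts : List Int) : ∀ (p acc : Int),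
    (((p :: ts).zip ts).foldl (fun acc' pt => acc' + min d (pt.2 - pt.1)) acc)
      = acc + gapSum d (p + d) ts := by
  induction ts with
  | nil => simp [gapSum]
  | cons x xs ih =>
    intro p acc
    simp only [List.zip_cons_cons, List.foldl_cons, gapSum]
    rw [ih x]
    have : min d (x - p) = min d (x + d - (p + d)) := by ring_nf
    rw [this]; ring

-- ===== VERDICT (by name: the statement is the Claim_ definition above) =====
theorem findPoisonDuration_spec : Claim_equal_findPoisonDuration := by
  intro ts d _
  unfold Spec_findPoisonDuration findPoisonDuration findPoisonDuration_alt
  rw [a_fold_eq_gapSum, b_fold_eq_gapSum]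
  have : -d + d = (0 : Int) := by ring
  rw [this]
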